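-- pv_equiv track=rewrite | github.com/raeez/chiral-bar-cobar | compute/lib/chain_level_spectral.py | reduced_forms
-- ===== SOURCE A (Python) =====
-- import math
--
-- def reduced_forms(D):
--     r"""
--     Enumerate reduced binary quadratic forms of discriminant D < 0.
--
--     A form (a,b,c) with D = b^2 - 4ac is reduced if:
--       |b| <= a <= c, and b >= 0 if |b| = a or a = c.
--
--     Returns list of (a,b,c) tuples.
--     """
--     if D >= 0:
--         return []
--     forms = []
--     # |b| <= a, and a*c = (b^2 - D)/4
--     b_max = int(math.isqrt(-D // 3)) if -D >= 3 else 0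
--     for b in range(-b_max, b_max + 1):
--         if (b * b - D) % 4 != 0:
--             continue
--         ac = (b * b - D) // 4
--         for a in range(1, int(math.isqrt(ac)) + 1):
--             if ac % a != 0:
--                 continue
--             c = ac // a
--             if c < a:
--                 continue
--             if abs(b) > a:
--                 continue
--             # Reduction conditions
--             if abs(b) == a and b < 0:
--                 continue
--             if a == c and b < 0:
--                 continue
--             forms.append((a, b, c))
--     return forms
-- ===== SOURCE B (Python) =====
-- import math
--
-- def reduced_forms(D):
--     """Enumerate reduced forms (a,b,c) of discriminant D < 0 by looping a, then
--     b with |b| <= a, testing directly whether b*b - D is divisible by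
--     four times a (no trial factorisation of ac); finally sort by (b, a) to get the b-outer ordering."""
--     if D >= 0:
--         return []
--     forms = []
--     a_max = math.isqrt(-D // 3)
--     for a in range(1, a_max + 1):
--         for b in range(-a, a + 1):
--             if (b * b - D) % (4 * a) != 0:
--                 continue
--             c = (b * b - D) // (4 * a)
--             if c < a:
--                 continue
--             if b < 0 and (-b == a or a == c):
--                 continue
--             forms.append((a, b, c))
--     return sorted(forms, key=lambda f: (f[1], f[0]))
-- ===== Notes on version B (the rewrite author's own statement) =====
-- stated objective: alternative
-- what changed: A loops over b and factors ac by trial division to find each a; B loops a up to isqrt(-D//three), loops b in [-a,a] (so |b|<=a holds by construction), accepts when b*b-D is divisible by four times a, and finally sorts the result by key (b,a) to reproduce A's b-outer order.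
import Mathlib
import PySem

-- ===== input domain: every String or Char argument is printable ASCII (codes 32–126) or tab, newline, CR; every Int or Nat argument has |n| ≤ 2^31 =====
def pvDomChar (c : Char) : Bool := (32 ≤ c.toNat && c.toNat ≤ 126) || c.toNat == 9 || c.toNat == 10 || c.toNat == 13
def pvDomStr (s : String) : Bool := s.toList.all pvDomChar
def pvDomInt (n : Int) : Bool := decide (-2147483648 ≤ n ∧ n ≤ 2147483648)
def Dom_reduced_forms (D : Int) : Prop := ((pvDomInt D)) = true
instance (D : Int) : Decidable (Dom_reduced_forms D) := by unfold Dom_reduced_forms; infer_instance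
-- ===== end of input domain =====

-- B replaces A's per-b trial factorisation of ac with an a-outer loop testing 4a | b*b-D directly,
-- then sorts by (b,a); an alternative decomposition of the same enumeration (not measured faster).

-- ===== PORT A =====
-- math.isqrt(n): exact for n ≥ 0 (both ports only apply it to nonnegative arguments)
def pyIsqrt (n : Int) : Int := (Nat.sqrt n.toNat : Int)

def reduced_forms (D : Int) : List (Int × Int × Int) :=
  if D ≥ 0 then []
  else
    let bmax : Int := if 3 ≤ -D then pyIsqrt (PySem.Int.floordiv (-D) 3) else 0
    (PySem.List.pyRange (-bmax) (bmax + 1) 1).foldl (fun forms b =>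
      if PySem.Int.mod (b * b - D) 4 ≠ 0 then forms
      else
        let ac := PySem.Int.floordiv (b * b - D) 4
        (PySem.List.pyRange 1 (pyIsqrt ac + 1) 1).foldl (fun forms a =>
          if PySem.Int.mod ac a ≠ 0 then forms
          else
            let c := PySem.Int.floordiv ac a
            if c < a then forms
            else if |b| > a then forms
            else if |b| = a ∧ b < 0 then forms
            else if a = c ∧ b < 0 then forms
            else forms ++ [(a, b, c)]) forms) []

-- ===== PORT B =====
def reduced_forms_alt (D : Int) : List (Int × Int × Int) :=
  if D ≥ 0 then []
  else
    let amax : Int := pyIsqrt (PySem.Int.floordiv (-D) 3)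
    let forms := (PySem.List.pyRange 1 (amax + 1) 1).foldl (fun forms a =>
      (PySem.List.pyRange (-a) (a + 1) 1).foldl (fun forms b =>
        if PySem.Int.mod (b * b - D) (4 * a) ≠ 0 then forms
        else
          let c := PySem.Int.floordiv (b * b - D) (4 * a)
          if c < a then forms
          else if b < 0 ∧ (-b = a ∨ a = c) then forms
          else forms ++ [(a, b, c)]) forms) []
    PySem.List.sorted2 forms (fun f => f.2.1) (fun f => f.1) false

-- ===== PRECONDITION & SPEC =====
def Spec_reduced_forms (D : Int) (out : List (Int × Int × Int)) : Prop := out = reduced_forms_alt D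
instance (D : Int) (out : List (Int × Int × Int)) : Decidable (Spec_reduced_forms D out) := by unfold Spec_reduced_forms; infer_instance

-- ===== CLAIM (what is proved, stated in full; the proofs are below) =====
def Claim_equal_reduced_forms : Prop := ∀ (D : Int), Dom_reduced_forms D → Spec_reduced_forms D (reduced_forms D)

-- ===== LEMMAS AND PROOFS =====

-- the key A orders its output by: (b, a) lexicographically
def lexKey (f : Int × Int × Int) : Lex (Int × Int) := toLex (f.2.1, f.1)
-- the key B's raw (unsorted) list is ordered by: (a, b) lexicographically
def abKey (f : Int × Int × Int) : Lex (Int × Int) := toLex (f.1, f.2.1)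

def bmaxOf (D : Int) : Int := if 3 ≤ -D then pyIsqrt (PySem.Int.floordiv (-D) 3) else 0
def acOf (D b : Int) : Int := PySem.Int.floordiv (b * b - D) 4

def pA (D b a : Int) : Bool := decide (
  PySem.Int.mod (b * b - D) 4 = 0 ∧ PySem.Int.mod (acOf D b) a = 0 ∧
  ¬(PySem.Int.floordiv (acOf D b) a < a) ∧ ¬(|b| > a) ∧
  ¬(|b| = a ∧ b < 0) ∧ ¬(a = PySem.Int.floordiv (acOf D b) a ∧ b < 0))

def blockA (D b : Int) : List (Int × Int × Int) :=
  ((PySem.List.pyRange 1 (pyIsqrt (acOf D b) + 1) 1).filter (pA D b)).map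
    (fun a => (a, b, PySem.Int.floordiv (acOf D b) a))

def listA (D : Int) : List (Int × Int × Int) :=
  (PySem.List.pyRange (-(bmaxOf D)) (bmaxOf D + 1) 1).flatMap (blockA D)

def pB (D a b : Int) : Bool := decide (
  PySem.Int.mod (b * b - D) (4 * a) = 0 ∧
  ¬(PySem.Int.floordiv (b * b - D) (4 * a) < a) ∧
  ¬(b < 0 ∧ (-b = a ∨ a = PySem.Int.floordiv (b * b - D) (4 * a))))

def blockB (D a : Int) : List (Int × Int × Int) :=
  ((PySem.List.pyRange (-a) (a + 1) 1).filter (pB D a)).map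
    (fun b => (a, b, PySem.Int.floordiv (b * b - D) (4 * a)))

def listB (D : Int) : List (Int × Int × Int) :=
  (PySem.List.pyRange 1 (pyIsqrt (PySem.Int.floordiv (-D) 3) + 1) 1).flatMap (blockB D)

-- the membership predicate both enumerations realise
def memP (D a b c : Int) : Prop :=
  1 ≤ a ∧ 3 * (a * a) ≤ -D ∧ -a ≤ b ∧ b ≤ a ∧ b * b - D = 4 * (a * c) ∧ a ≤ c ∧
  ¬(b < 0 ∧ (-b = a ∨ a = c))

lemma le_pyIsqrt_iff (n a : Int) (hn : 0 ≤ n) (ha : 1 ≤ a) : a ≤ pyIsqrt n ↔ a * a ≤ n := by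
  unfold pyIsqrt
  have hsq := Nat.le_sqrt (m := a.toNat) (n := n.toNat)
  have h1 : (a.toNat : Int) = a := Int.toNat_of_nonneg (by omega)
  have h2 : (n.toNat : Int) = n := Int.toNat_of_nonneg hn
  constructor
  · intro h
    have hle : a.toNat ≤ Nat.sqrt n.toNat := by omega
    have := hsq.mp hle
    have : ((a.toNat * a.toNat : Nat) : Int) ≤ ((n.toNat : Nat) : Int) := by exact_mod_cast this
    push_cast at this
    rw [h1, h2] at this
    exact this
  · intro h
    have hle : ((a.toNat * a.toNat : Nat) : Int) ≤ (n.toNat : Int) := by push_cast; rw [h1, h2]; exact h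
    have := hsq.mpr (by exact_mod_cast hle)
    omega

lemma quot_char (x d c : Int) (hd : 0 < d) :
    PySem.Int.mod x d = 0 ∧ PySem.Int.floordiv x d = c ↔ x = d * c := by
  rw [PySem.Int.mod_eq_zero_iff_dvd, PySem.Int.floordiv_eq_ediv_of_pos hd]
  constructor
  · rintro ⟨⟨k, rfl⟩, hq⟩
    rw [Int.mul_ediv_cancel_left k (by omega)] at hq
    rw [hq]
  · rintro rfl
    exact ⟨⟨c, rfl⟩, Int.mul_ediv_cancel_left c (by omega)⟩

lemma amax_iff (D a : Int) (hD : D < 0) (ha : 1 ≤ a) :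
    a ≤ pyIsqrt (PySem.Int.floordiv (-D) 3) ↔ 3 * (a * a) ≤ -D := by
  rw [PySem.Int.floordiv_eq_ediv_of_pos (by norm_num : (0:Int) < 3)]
  rw [le_pyIsqrt_iff _ _ (Int.ediv_nonneg (by omega) (by norm_num)) ha]
  rw [Int.le_ediv_iff_mul_le (by norm_num : (0:Int) < 3)]
  constructor <;> intro h <;> linarith

lemma mem_listB (D a b c : Int) (hD : D < 0) : (a, b, c) ∈ listB D ↔ memP D a b c := by
  simp only [listB, blockB, List.mem_flatMap, List.mem_map, List.mem_filter,
    PySem.List.mem_pyRange_one, pB, decide_eq_true_eq, Prod.mk.injEq]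
  constructor
  · rintro ⟨a', ⟨ha1, ha2⟩, b', ⟨⟨hb1, hb2⟩, hmod, hfd, hbd⟩, rfl, rfl, hc⟩
    have h4a : (0:Int) < 4 * a' := by omega
    have heq : b' * b' - D = 4 * (a' * c) := by
      have h := (quot_char (b' * b' - D) (4 * a') c h4a).mp ⟨hmod, hc⟩
      linarith [h]
    refine ⟨ha1, (amax_iff D a' hD ha1).mp (by omega), by omega, by omega, heq, by omega, ?_⟩
    rw [hc] at hbd
    exact hbd
  · rintro ⟨ha1, hbound, hb1, hb2, heq, hac, hbd⟩
    have h4a : (0:Int) < 4 * a := by omega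
    obtain ⟨hmod, hfd⟩ := (quot_char (b * b - D) (4 * a) c h4a).mpr (by linarith [heq])
    refine ⟨a, ⟨ha1, by have := (amax_iff D a hD ha1).mpr hbound; omega⟩, b,
      ⟨⟨by omega, by omega⟩, hmod, by omega, by rw [hfd]; exact hbd⟩, rfl, rfl, hfd⟩

lemma mem_listA (D a b c : Int) (hD : D < 0) : (a, b, c) ∈ listA D ↔ memP D a b c := by
  simp only [listA, blockA, List.mem_flatMap, List.mem_map, List.mem_filter,
    PySem.List.mem_pyRange_one, pA, decide_eq_true_eq, Prod.mk.injEq]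
  constructor
  · rintro ⟨b', ⟨hbl, hbr⟩, a', ⟨⟨ha1, ha2⟩, h4, hma, hfd, habs, hb3, hb4⟩, rfl, rfl, hc⟩
    have hapos : (0:Int) < a' := by omega
    have hacm : b' * b' - D = 4 * acOf D b' :=
      (quot_char (b' * b' - D) 4 (acOf D b') (by norm_num)).mp ⟨h4, rfl⟩
    have hacm2 : acOf D b' = a' * c := (quot_char (acOf D b') a' c hapos).mp ⟨hma, hc⟩
    have heq : b' * b' - D = 4 * (a' * c) := by rw [hacm, hacm2]
    have habs' : |b'| ≤ a' := not_lt.mp habs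
    have hb12 := abs_le.mp habs'
    have hacge : a' ≤ c := by rw [hc] at hfd; omega
    have hbb : b' * b' ≤ a' * a' := by
      calc b' * b' = |b'| * |b'| := (abs_mul_abs_self b').symm
        _ ≤ a' * a' := mul_self_le_mul_self (abs_nonneg b') habs'
    have hcc : a' * a' ≤ a' * c := mul_le_mul_of_nonneg_left hacge (by omega)
    refine ⟨ha1, by linarith, hb12.1, hb12.2, heq, hacge, ?_⟩
    rintro ⟨hneg, hor⟩
    rcases hor with h | h
    · exact hb3 ⟨by rw [abs_of_neg hneg, h], hneg⟩
    · rw [hc] at hb4; exact hb4 ⟨h, hneg⟩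
  · rintro ⟨ha1, hD3, hb1, hb2, heq, hac, hbd⟩
    have hapos : (0:Int) < a := by omega
    obtain ⟨h4, hfd4⟩ := (quot_char (b * b - D) 4 (a * c) (by norm_num)).mpr heq
    have hacm : acOf D b = a * c := hfd4
    obtain ⟨hma, hfdc⟩ := (quot_char (acOf D b) a c hapos).mpr hacm
    have haa1 : 1 ≤ a * a := by nlinarith
    have h3 : 3 ≤ -D := by linarith
    have hbm : bmaxOf D = pyIsqrt (PySem.Int.floordiv (-D) 3) := if_pos h3
    have habm : a ≤ pyIsqrt (PySem.Int.floordiv (-D) 3) := (amax_iff D a hD ha1).mpr hD3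
    have hisq : a ≤ pyIsqrt (acOf D b) := by
      rw [le_pyIsqrt_iff _ _ (by nlinarith [hacm]) ha1, hacm]
      exact mul_le_mul_of_nonneg_left hac (by omega)
    refine ⟨b, ⟨by omega, by omega⟩, a, ⟨⟨ha1, by omega⟩, h4, hma, by omega, ?_, ?_, ?_⟩,
      rfl, rfl, hfdc⟩
    · rw [not_lt]; exact abs_le.mpr ⟨hb1, hb2⟩
    · rintro ⟨he, hneg⟩
      exact hbd ⟨hneg, Or.inl (by rw [← he, abs_of_neg hneg])⟩
    · rw [hfdc]
      rintro ⟨he, hneg⟩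
      exact hbd ⟨hneg, Or.inr he⟩

lemma snd_mem_blockA (D b : Int) {x : Int × Int × Int} (hx : x ∈ blockA D b) : x.2.1 = b := by
  simp only [blockA, List.mem_map] at hx
  obtain ⟨a, -, rfl⟩ := hx
  rfl

lemma fst_mem_blockB (D a : Int) {x : Int × Int × Int} (hx : x ∈ blockB D a) : x.1 = a := by
  simp only [blockB, List.mem_map] at hx
  obtain ⟨b, -, rfl⟩ := hx
  rfl

lemma pairwiseA (D : Int) : (listA D).Pairwise (fun s t => lexKey s < lexKey t) := by
  unfold listA
  rw [List.pairwise_flatMap]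
  constructor
  · intro b hb
    unfold blockA
    refine List.Pairwise.map _ (fun a a' hlt => ?_)
      ((PySem.List.pairwise_lt_pyRange_one _ _).filter _)
    simp only [lexKey, Prod.Lex.toLex_lt_toLex]
    exact Or.inr ⟨trivial, hlt⟩
  · refine (PySem.List.pairwise_lt_pyRange_one _ _).imp ?_
    intro b1 b2 hlt x hx y hy
    simp only [lexKey, Prod.Lex.toLex_lt_toLex]
    exact Or.inl (by rw [snd_mem_blockA D b1 hx, snd_mem_blockA D b2 hy]; exact hlt)

lemma pairwiseB (D : Int) : (listB D).Pairwise (fun s t => abKey s < abKey t) := by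
  unfold listB
  rw [List.pairwise_flatMap]
  constructor
  · intro a ha
    unfold blockB
    refine List.Pairwise.map _ (fun b b' hlt => ?_)
      ((PySem.List.pairwise_lt_pyRange_one _ _).filter _)
    simp only [abKey, Prod.Lex.toLex_lt_toLex]
    exact Or.inr ⟨trivial, hlt⟩
  · refine (PySem.List.pairwise_lt_pyRange_one _ _).imp ?_
    intro a1 a2 hlt x hx y hy
    simp only [abKey, Prod.Lex.toLex_lt_toLex]
    exact Or.inl (by rw [fst_mem_blockB D a1 hx, fst_mem_blockB D a2 hy]; exact hlt)

lemma shapeA (D : Int) (hD : ¬ D ≥ 0) : reduced_forms D = listA D := by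
  unfold reduced_forms listA
  rw [if_neg hD]
  show (PySem.List.pyRange (-(bmaxOf D)) (bmaxOf D + 1) 1).foldl _ [] = _
  have hbody : (fun (forms : List (Int × Int × Int)) b =>
      if PySem.Int.mod (b * b - D) 4 ≠ 0 then forms
      else
        (PySem.List.pyRange 1 (pyIsqrt (PySem.Int.floordiv (b * b - D) 4) + 1) 1).foldl (fun forms a =>
          if PySem.Int.mod (PySem.Int.floordiv (b * b - D) 4) a ≠ 0 then forms
          else
            if PySem.Int.floordiv (PySem.Int.floordiv (b * b - D) 4) a < a then forms
            else if |b| > a then forms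
            else if |b| = a ∧ b < 0 then forms
            else if a = PySem.Int.floordiv (PySem.Int.floordiv (b * b - D) 4) a ∧ b < 0 then forms
            else forms ++ [(a, b, PySem.Int.floordiv (PySem.Int.floordiv (b * b - D) 4) a)]) forms)
      = fun forms b => forms ++ blockA D b := by
    funext forms b
    by_cases h4 : PySem.Int.mod (b * b - D) 4 = 0
    · rw [if_neg (by simpa using h4)]
      have hinner : (fun (forms : List (Int × Int × Int)) a =>
          if PySem.Int.mod (PySem.Int.floordiv (b * b - D) 4) a ≠ 0 then forms
          else
            if PySem.Int.floordiv (PySem.Int.floordiv (b * b - D) 4) a < a then forms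
            else if |b| > a then forms
            else if |b| = a ∧ b < 0 then forms
            else if a = PySem.Int.floordiv (PySem.Int.floordiv (b * b - D) 4) a ∧ b < 0 then forms
            else forms ++ [(a, b, PySem.Int.floordiv (PySem.Int.floordiv (b * b - D) 4) a)])
          = fun acc a => if pA D b a then acc ++ [(a, b, PySem.Int.floordiv (acOf D b) a)] else acc := by
        funext acc a
        simp only [pA, acOf, h4, decide_eq_true_eq, true_and]
        split_ifs <;> first | rfl | tauto
      rw [hinner, PySem.List.foldl_append_if]
      rfl
    · rw [if_pos (by simpa using h4)]
      have : blockA D b = [] := by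
        have : ∀ a, pA D b a = false := by
          intro a; simp only [pA, decide_eq_false_iff_not]; rintro ⟨h, -⟩; exact h4 h
        simp [blockA, List.filter_eq_nil_iff, this]
      rw [this, List.append_nil]
  rw [hbody, PySem.List.foldl_append_eq_flatMap]
  rfl

lemma shapeB (D : Int) (hD : ¬ D ≥ 0) :
    reduced_forms_alt D = PySem.List.sorted2 (listB D) (fun f => f.2.1) (fun f => f.1) false := by
  unfold reduced_forms_alt listB
  rw [if_neg hD]
  show PySem.List.sorted2 ((PySem.List.pyRange 1 (pyIsqrt (PySem.Int.floordiv (-D) 3) + 1) 1).foldl _ []) _ _ false = _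
  congr 1
  have hbody : (fun (forms : List (Int × Int × Int)) a =>
      (PySem.List.pyRange (-a) (a + 1) 1).foldl (fun forms b =>
        if PySem.Int.mod (b * b - D) (4 * a) ≠ 0 then forms
        else
          if PySem.Int.floordiv (b * b - D) (4 * a) < a then forms
          else if b < 0 ∧ (-b = a ∨ a = PySem.Int.floordiv (b * b - D) (4 * a)) then forms
          else forms ++ [(a, b, PySem.Int.floordiv (b * b - D) (4 * a))]) forms)
      = fun forms a => forms ++ blockB D a := by
    funext forms a
    have hinner : (fun (acc : List (Int × Int × Int)) b =>
        if PySem.Int.mod (b * b - D) (4 * a) ≠ 0 then acc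
        else
          if PySem.Int.floordiv (b * b - D) (4 * a) < a then acc
          else if b < 0 ∧ (-b = a ∨ a = PySem.Int.floordiv (b * b - D) (4 * a)) then acc
          else acc ++ [(a, b, PySem.Int.floordiv (b * b - D) (4 * a))])
        = fun acc b => if pB D a b then acc ++ [(a, b, PySem.Int.floordiv (b * b - D) (4 * a))] else acc := by
      funext acc b
      simp only [pB, decide_eq_true_eq]
      split_ifs <;> first | rfl | tauto
    rw [hinner, PySem.List.foldl_append_if]
    rfl
  rw [hbody, PySem.List.foldl_append_eq_flatMap]
  rfl

lemma sorted2_eq_sorted_lex (xs : List (Int × Int × Int)) :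
    PySem.List.sorted2 xs (fun f => f.2.1) (fun f => f.1) false = PySem.List.sorted xs lexKey := by
  rw [PySem.List.sorted_eq_foldl_insertBy]
  show List.foldl (fun acc x => PySem.List.insertBy _ x acc) [] xs = _
  congr 1
  funext acc x
  congr 1
  funext a b
  simp only [lexKey]
  rcases lt_trichotomy (a.2.1) (b.2.1) with h | h | h
  · simp [Prod.Lex.toLex_lt_toLex, h, not_lt.mpr (le_of_lt h)]
  · simp [Prod.Lex.toLex_lt_toLex, h]
  · simp [Prod.Lex.toLex_lt_toLex, not_lt.mpr (le_of_lt h), h, ne_of_gt h]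

lemma nodup_of_key_pairwise {κ : Type} [Preorder κ] (key : (Int × Int × Int) → κ)
    (xs : List (Int × Int × Int)) (h : xs.Pairwise (fun s t => key s < key t)) : xs.Nodup :=
  h.imp (fun {s t} hlt => by rintro rfl; exact lt_irrefl _ hlt)

lemma permAB (D : Int) (hD : D < 0) : (listA D).Perm (listB D) := by
  refine (List.perm_ext_iff_of_nodup (nodup_of_key_pairwise lexKey _ (pairwiseA D))
    (nodup_of_key_pairwise abKey _ (pairwiseB D))).mpr ?_
  rintro ⟨a, b, c⟩
  rw [mem_listA D a b c hD, mem_listB D a b c hD]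

-- ===== VERDICT (by name: the statement is the Claim_ definition above) =====
theorem reduced_forms_spec : Claim_equal_reduced_forms := by
  intro D _
  unfold Spec_reduced_forms
  by_cases hD : D ≥ 0
  · simp [reduced_forms, reduced_forms_alt, hD]
  · rw [shapeA D hD, shapeB D hD, sorted2_eq_sorted_lex]
    exact (PySem.List.sorted_eq_of_perm_of_pairwise_lt (listB D) (listA D) lexKey
      (permAB D (by omega)) (pairwiseA D)).symm
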